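-- pv_equiv track=rewrite | github.com/abhishek-kgithub/Python-journey | remove_Consecutive _k_element_record.py | consecutive_k
-- ===== SOURCE A (Python) =====
-- def consecutive_k(li,K):
--     result=[]
--     for item in li:
--         skip=False
--         for ele in range(len(item)-1):
--             if item[ele]==K and item[ele+1]==K:
--              skip=True
--              break
--         if not skip:
--             result.append(item)
--     return result
-- ===== SOURCE B (Python) =====
-- def consecutive_k(li, K):
--     # Run-length decomposition: collapse each item into (value, count) runs,
--     # then keep the item unless some run has value K and length >= 2.
--     def runs(item):
--         res = []
--         for x in item:
--             if res and res[-1][0] == x: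
--                 res[-1] = (x, res[-1][1] + 1)
--             else:
--                 res.append((x, 1))
--         return res
--
--     return [item for item in li
--             if not any(k == K and n >= 2 for (k, n) in runs(item))]
-- ===== Notes on version B (the rewrite author's own statement) =====
-- stated objective: alternative
-- what changed: Replaces A's index-pair scan with a break flag by a run-length decomposition of each item into (value,count) runs, filtering out items having a run of K with count >= 2.
import Mathlib
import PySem

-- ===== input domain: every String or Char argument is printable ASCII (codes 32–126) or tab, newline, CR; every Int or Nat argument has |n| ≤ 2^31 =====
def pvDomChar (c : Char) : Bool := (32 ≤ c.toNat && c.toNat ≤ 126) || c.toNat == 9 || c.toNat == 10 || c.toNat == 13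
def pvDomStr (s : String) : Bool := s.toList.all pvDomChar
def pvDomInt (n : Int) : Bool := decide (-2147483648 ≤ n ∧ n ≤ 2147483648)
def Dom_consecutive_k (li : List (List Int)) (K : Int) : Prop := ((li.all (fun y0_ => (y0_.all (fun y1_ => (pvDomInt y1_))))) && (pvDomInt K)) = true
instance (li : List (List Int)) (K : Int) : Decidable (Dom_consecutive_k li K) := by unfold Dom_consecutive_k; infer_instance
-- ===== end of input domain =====

-- B replaces A's index-pair scan with a break flag by a run-length decomposition of each item; alternative decomposition, same cost.

-- ===== PORT A =====
-- inner 'for ele in range(len(item)-1): if item[ele]==K and item[ele+1]==K: skip=True; break'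
def pvAInner (item : List Int) (K : Int) : List Int → Bool
  | [] => false
  | e :: rest =>
    if PySem.List.pyGet? item e = some K ∧ PySem.List.pyGet? item (e + 1) = some K then true
    else pvAInner item K rest

def pvASkip (item : List Int) (K : Int) : Bool :=
  pvAInner item K (PySem.List.pyRange 0 ((item.length : Int) - 1) 1)

def consecutive_k (li : List (List Int)) (K : Int) : List (List Int) :=
  li.foldl (fun result item => if pvASkip item K then result else result ++ [item]) []

-- ===== PORT B =====
-- one step of Source B's runs loop: 'if res and res[-1][0] == x: res[-1] = (x, res[-1][1]+1) else: res.append((x, 1))'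
def pvRunStep (res : List (Int × Nat)) (x : Int) : List (Int × Nat) :=
  match res.getLast? with
  | some (k, n) => if k = x then res.dropLast ++ [(x, n + 1)] else res ++ [(x, 1)]
  | none => res ++ [(x, 1)]

-- runs(item): collapse a list into consecutive (value, count) runs
def pvRunsIter (item : List Int) : List (Int × Nat) :=
  item.foldl pvRunStep []

def pvBSkip (K : Int) (item : List Int) : Bool :=
  (pvRunsIter item).any (fun p => p.1 == K && decide (2 ≤ p.2))

def consecutive_k_alt (li : List (List Int)) (K : Int) : List (List Int) :=
  li.filter (fun item => !pvBSkip K item)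

-- ===== PRECONDITION & SPEC =====
def Spec_consecutive_k (li : List (List Int)) (K : Int) (out : List (List Int)) : Prop := out = consecutive_k_alt li K
instance (li : List (List Int)) (K : Int) (out : List (List Int)) : Decidable (Spec_consecutive_k li K out) := by unfold Spec_consecutive_k; infer_instance

-- ===== CLAIM (what is proved, stated in full; the proofs are below) =====
def Claim_equal_consecutive_k : Prop := ∀ (li : List (List Int)) (K : Int), Dom_consecutive_k li K → Spec_consecutive_k li K (consecutive_k li K)

-- ===== LEMMAS AND PROOFS =====

-- common characterisation: the list has two equal-to-K adjacent elements
def pvHasPair (K : Int) : List Int → Bool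
  | x :: y :: t => (x == K && y == K) || pvHasPair K (y :: t)
  | _ => false

-- recursive (back-to-front) run-length decomposition, used to reason about the foldl
def pvRunsCons (x : Int) : List (Int × Nat) → List (Int × Nat)
  | (k, n) :: t => if k = x then (x, n + 1) :: t else (x, 1) :: (k, n) :: t
  | [] => [(x, 1)]

def pvRuns : List Int → List (Int × Nat)
  | [] => []
  | x :: xs => pvRunsCons x (pvRuns xs)

-- merge an accumulator with a run list, fusing the boundary runs if their keys agree
def pvMerge (a : List (Int × Nat)) : List (Int × Nat) → List (Int × Nat)
  | [] => a
  | (k, n) :: t =>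
    match a.getLast? with
    | some (k', n') => if k' = k then a.dropLast ++ (k, n' + n) :: t else a ++ (k, n) :: t
    | none => (k, n) :: t

theorem pvMerge_step (acc : List (Int × Nat)) (x : Int) (R : List (Int × Nat)) :
    pvMerge (pvRunStep acc x) R = pvMerge acc (pvRunsCons x R) := by
  rcases List.eq_nil_or_concat acc with rfl | ⟨a, p, rfl⟩
  · cases R with
    | nil => rfl
    | cons q t =>
      obtain ⟨k, n⟩ := q
      by_cases hk : k = x
      · subst hk
        simp [pvRunStep, pvMerge, pvRunsCons, Nat.add_comm]
      · have hk2 : ¬ x = k := fun h => hk h.symm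
        simp [pvRunStep, pvMerge, pvRunsCons, hk, hk2]
  · obtain ⟨k', n'⟩ := p
    cases R with
    | nil =>
      by_cases hk' : k' = x
      · subst hk'
        simp [pvRunStep, pvMerge, pvRunsCons]
      · simp [pvRunStep, pvMerge, pvRunsCons, hk']
    | cons q t =>
      obtain ⟨k, n⟩ := q
      by_cases hk' : k' = x <;> by_cases hk : k = x
      · -- k' = x, k = x
        subst hk'
        subst hk
        simp [pvRunStep, pvMerge, pvRunsCons, Nat.add_comm, Nat.add_left_comm]
      · -- k' = x, k ≠ x
        subst hk'
        have hk2 : ¬ k' = k := fun h => hk h.symm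
        simp [pvRunStep, pvMerge, pvRunsCons, hk, hk2]
      · -- k' ≠ x, k = x
        subst hk
        simp [pvRunStep, pvMerge, pvRunsCons, hk', Nat.add_comm]
      · -- k' ≠ x, k ≠ x
        have hk2 : ¬ x = k := fun h => hk h.symm
        simp [pvRunStep, pvMerge, pvRunsCons, hk', hk, hk2]

theorem foldl_pvRunStep (xs : List Int) : ∀ acc : List (Int × Nat),
    xs.foldl pvRunStep acc = pvMerge acc (pvRuns xs) := by
  induction xs with
  | nil => intro acc; rfl
  | cons x xs ih =>
    intro acc
    rw [List.foldl_cons, ih (pvRunStep acc x), pvMerge_step]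
    rfl

theorem pvRunsIter_eq (item : List Int) : pvRunsIter item = pvRuns item := by
  rw [pvRunsIter, foldl_pvRunStep]
  cases pvRuns item with
  | nil => rfl
  | cons p t => obtain ⟨k, n⟩ := p; rfl

-- A-side: shifting the scanned indices by one steps into the tail of the list
theorem pvAInner_shift (x K : Int) (xs : List Int) (l : List Int)
    (h : ∀ e ∈ l, 0 ≤ e) :
    pvAInner (x :: xs) K (l.map (· + 1)) = pvAInner xs K l := by
  induction l with
  | nil => rfl
  | cons e rest ih =>
    have he : 0 ≤ e := h e (by simp)
    have h1 : PySem.List.pyGet? (x :: xs) (e + 1) = PySem.List.pyGet? xs e := by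
      have h' : e = ((e.toNat : Nat) : Int) := by omega
      rw [h']
      exact PySem.List.pyGet?_cons_succ ..
    have h2 : PySem.List.pyGet? (x :: xs) (e + 1 + 1) = PySem.List.pyGet? xs (e + 1) := by
      have h' : e + 1 = (((e.toNat + 1 : Nat)) : Int) := by omega
      rw [h']
      exact PySem.List.pyGet?_cons_succ ..
    simp only [List.map_cons, pvAInner, h1, h2]
    split
    · rfl
    · exact ih (fun e he' => h e (by simp [he']))

theorem pvRange_shift (b : Int) :
    PySem.List.pyRange 1 b 1 = (PySem.List.pyRange 0 (b - 1) 1).map (· + 1) := by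
  rw [PySem.List.pyRange_one, PySem.List.pyRange_one]
  have : (b - 1).toNat = (b - 1 - 0).toNat := by omega
  rw [← this, List.map_map]
  apply List.map_congr_left
  intro k _
  simp; omega

theorem pvASkip_eq_hasPair (item : List Int) (K : Int) :
    pvASkip item K = pvHasPair K item := by
  induction item with
  | nil => rfl
  | cons x xs ih =>
    cases xs with
    | nil =>
      rw [pvASkip, PySem.List.pyRange_one_eq_nil (by simp)]
      rfl
    | cons y t =>
      have hlen : ((x :: y :: t).length : Int) - 1 = (y :: t).length := by
        simp
      have hcons : PySem.List.pyRange 0 (((x :: y :: t).length : Int) - 1) 1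
          = 0 :: PySem.List.pyRange 1 (((x :: y :: t).length : Int) - 1) 1 := by
        apply PySem.List.pyRange_one_cons
        rw [hlen]; exact_mod_cast Nat.succ_pos t.length
      rw [pvASkip, hcons]
      have h0 : PySem.List.pyGet? (x :: y :: t) 0 = some x := PySem.List.pyGet?_zero_cons ..
      have h1 : PySem.List.pyGet? (x :: y :: t) (0 + 1) = some y := by
        have h' : (0 : Int) + 1 = ((1 : Nat) : Int) := by norm_num
        rw [h', PySem.List.pyGet?_natCast]
        rfl
      simp only [pvAInner, h0, h1]
      by_cases hk : x = K ∧ y = K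
      · simp [pvHasPair, hk.1, hk.2]
      · have hne : ¬ (some x = some K ∧ some y = some K) := by
          simpa using hk
        rw [if_neg hne]
        rw [pvRange_shift, pvAInner_shift x K (y :: t) _
            (fun e he => by
              rw [PySem.List.mem_pyRange_one] at he; exact he.1)]
        have : PySem.List.pyRange 0 (((x :: y :: t).length : Int) - 1 - 1) 1
            = PySem.List.pyRange 0 (((y :: t).length : Int) - 1) 1 := by
          congr 1; simp
        rw [this]
        rw [show pvAInner (y :: t) K (PySem.List.pyRange 0 (((y :: t).length : Int) - 1) 1) = pvASkip (y :: t) K from rfl, ih]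
        have : pvHasPair K (x :: y :: t) = ((x == K && y == K) || pvHasPair K (y :: t)) := rfl
        rw [this]
        have : (x == K && y == K) = false := by
          rcases Decidable.not_and_iff_or_not.mp hk with h | h <;> simp [h]
        rw [this, Bool.false_or]

-- B-side invariants of pvRuns
theorem pvRuns_head (xs : List Int) (k : Int) (n : Nat) (t : List (Int × Nat))
    (h : pvRuns xs = (k, n) :: t) : xs.head? = some k ∧ 1 ≤ n := by
  induction xs generalizing k n t with
  | nil => simp [pvRuns] at h
  | cons x xs ih =>
    rw [pvRuns] at h
    cases hxs : pvRuns xs with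
    | nil => rw [hxs] at h; simp_all [pvRunsCons]
    | cons p t' =>
      obtain ⟨k', n'⟩ := p
      rw [hxs, pvRunsCons] at h
      by_cases hk : k' = x
      · rw [if_pos hk] at h
        simp only [List.cons.injEq, Prod.mk.injEq] at h
        exact ⟨by simp [h.1.1], by omega⟩
      · rw [if_neg hk] at h
        simp only [List.cons.injEq, Prod.mk.injEq] at h
        exact ⟨by simp [h.1.1], by omega⟩

theorem pvRuns_nil_iff (xs : List Int) : pvRuns xs = [] ↔ xs = [] := by
  cases xs with
  | nil => simp [pvRuns]
  | cons x xs =>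
    rw [pvRuns]
    cases pvRuns xs with
    | nil => simp [pvRunsCons]
    | cons p t =>
      obtain ⟨k, n⟩ := p
      rw [pvRunsCons]
      split <;> simp

theorem pvRunsAny_eq_hasPair (K : Int) (item : List Int) :
    ((pvRuns item).any (fun p => p.1 == K && decide (2 ≤ p.2))) = pvHasPair K item := by
  induction item with
  | nil => rfl
  | cons x xs ih =>
    rw [pvRuns]
    cases hxs : pvRuns xs with
    | nil =>
      have hx : xs = [] := (pvRuns_nil_iff xs).mp hxs
      subst hx
      simp [pvHasPair, pvRunsCons]
    | cons p t =>
      obtain ⟨k, n⟩ := p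
      obtain ⟨hhead, hn⟩ := pvRuns_head xs k n t hxs
      obtain ⟨y, ys, rfl⟩ : ∃ y ys, xs = y :: ys := by
        cases xs with
        | nil => simp at hhead
        | cons y ys => exact ⟨y, ys, rfl⟩
      have hy : y = k := by simpa using hhead
      subst hy
      rw [hxs] at ih
      rw [pvRunsCons]
      by_cases hk : y = x
      · subst hk
        rw [if_pos rfl]
        simp only [List.any_cons] at ih ⊢
        rw [show pvHasPair K (y :: y :: ys) = ((y == K && y == K) || pvHasPair K (y :: ys)) from rfl, ← ih]
        cases hKk : y == K <;> simp [hn]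
      · rw [if_neg hk]
        simp only [List.any_cons] at ih ⊢
        rw [show pvHasPair K (x :: y :: ys) = ((x == K && y == K) || pvHasPair K (y :: ys)) from rfl, ← ih]
        have : (x == K && y == K) = false := by
          cases hxK : x == K <;> cases hyK : y == K <;> simp_all
        simp [this]

theorem pvBSkip_eq_hasPair (K : Int) (item : List Int) :
    pvBSkip K item = pvHasPair K item := by
  rw [pvBSkip, pvRunsIter_eq, pvRunsAny_eq_hasPair]

-- ===== VERDICT (by name: the statement is the Claim_ definition above) =====
theorem consecutive_k_spec : Claim_equal_consecutive_k := by
  intro li K _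
  unfold Spec_consecutive_k consecutive_k consecutive_k_alt
  have hcg : li.foldl (fun result item => if pvASkip item K then result else result ++ [item]) []
      = li.foldl (fun result item => if (!pvBSkip K item) = true then result ++ [item] else result) [] := by
    apply PySem.List.foldl_congr_mem
    intro acc x _
    rw [pvASkip_eq_hasPair, ← pvBSkip_eq_hasPair]
    cases pvBSkip K x <;> simp
  rw [hcg, PySem.List.foldl_append_if_eq_filter]
  simp
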